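-- pv_equiv track=rewrite | github.com/pypi-data/pypi-mirror-401 | packages/gus-nba-tools/gus_nba_tools-0.2.1-py3-none-any.whl/gus_nba_tools/player_data_processor.py | _away_streak
-- ===== SOURCE A (Python) =====
-- def _away_streak(away_column):
--     streaks = []
--     streak = 0
--     for value in away_column:
--         if value == 1:  # away
--             streak += 1
--         else:
--             streak = 0
--         streaks.append(streak)
--     return streaks
-- ===== SOURCE B (Python) =====
-- def _away_streak(away_column):
--     res = []
--     i = 0
--     n = len(away_column)
--     while i < n:
--         if away_column[i] == 1:
--             j = i + 1
--             while j < n and away_column[j] == 1: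
--                 j += 1
--             res.extend(range(1, j - i + 1))
--             i = j
--         else:
--             res.append(0)
--             i += 1
--     return res
-- ===== Notes on version B (the rewrite author's own statement) =====
-- stated objective: alternative
-- what changed: Replaces the scalar running-counter scan with a run-based traversal: each maximal run of 1s is located and emitted as the ramp 1..k, non-1 values emit 0 directly.
import Mathlib
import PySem

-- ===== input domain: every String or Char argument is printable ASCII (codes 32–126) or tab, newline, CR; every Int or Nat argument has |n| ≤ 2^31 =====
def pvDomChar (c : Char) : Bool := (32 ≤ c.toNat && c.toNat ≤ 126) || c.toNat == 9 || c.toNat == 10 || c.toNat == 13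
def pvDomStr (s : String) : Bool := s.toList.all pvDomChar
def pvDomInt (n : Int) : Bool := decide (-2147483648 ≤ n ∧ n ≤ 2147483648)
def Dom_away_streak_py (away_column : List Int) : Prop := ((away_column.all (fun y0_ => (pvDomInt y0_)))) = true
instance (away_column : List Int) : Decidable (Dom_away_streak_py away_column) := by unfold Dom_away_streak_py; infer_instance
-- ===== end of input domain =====

-- B replaces A's scalar running-counter scan with a run-based traversal (ramp 1..k per maximal run of 1s); same O(n) cost, return value only.

-- ===== PORT A =====
-- literal port of A: fold over the list carrying (streak, streaks)
def away_streak_py (away_column : List Int) : List Int :=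
  (away_column.foldl
    (fun (st : Int × List Int) value =>
      let streak := if value = 1 then st.1 + 1 else 0
      (streak, st.2 ++ [streak]))
    (0, [])).2

-- ===== PORT B =====
-- port of B: recursion over the list; a maximal run of 1s at the head emits the ramp 1..k
def away_streak_py_alt_go : List Int → List Int
  | [] => []
  | v :: rest =>
    if v = 1 then
      let k := (rest.takeWhile (fun x => x = 1)).length + 1
      (PySem.List.pyRange 1 (k + 1) 1) ++ away_streak_py_alt_go (rest.dropWhile (fun x => x = 1))
    else
      0 :: away_streak_py_alt_go rest
  termination_by l => l.length
  decreasing_by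
    · exact Nat.lt_succ_of_le (List.length_dropWhile_le _ _)
    · simp

def away_streak_py_alt (away_column : List Int) : List Int :=
  away_streak_py_alt_go away_column

-- ===== PRECONDITION & SPEC =====
def Spec_away_streak_py (away_column : List Int) (out : List Int) : Prop := out = away_streak_py_alt away_column
instance (away_column : List Int) (out : List Int) : Decidable (Spec_away_streak_py away_column out) := by unfold Spec_away_streak_py; infer_instance

-- ===== CLAIM (what is proved, stated in full; the proofs are below) =====
def Claim_equal_away_streak_py : Prop := ∀ (away_column : List Int), Dom_away_streak_py away_column → Spec_away_streak_py away_column (away_streak_py away_column)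

-- ===== LEMMAS AND PROOFS =====

-- direct-recursion characterisation of A's fold
def goA (s : Int) : List Int → List Int
  | [] => []
  | v :: rest =>
    let st := if v = 1 then s + 1 else 0
    st :: goA st rest

theorem foldl_goA (xs : List Int) : ∀ (s : Int) (acc : List Int),
    (xs.foldl (fun (st : Int × List Int) value =>
      let streak := if value = 1 then st.1 + 1 else 0
      (streak, st.2 ++ [streak])) (s, acc)).2 = acc ++ goA s xs := by
  induction xs with
  | nil => intro s acc; simp [goA]
  | cons v rest ih => intro s acc; simp [List.foldl, goA, ih]

theorem goA_ones (t : List Int) (ht : ∀ x ∈ t, x = 1) : ∀ (s : Int) (d : List Int),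
    goA s (t ++ d) = (List.range t.length).map (fun k : ℕ => s + 1 + (k : ℤ)) ++ goA (s + t.length) d := by
  induction t with
  | nil => intro s d; simp [goA]
  | cons v t' ih =>
    intro s d
    have hv : v = 1 := ht v (by simp)
    have ht' : ∀ x ∈ t', x = 1 := fun x hx => ht x (by simp [hx])
    simp only [List.cons_append, goA, hv, ih ht']
    rw [List.length_cons, List.range_succ_eq_map]
    simp only [List.map_cons, List.map_map, List.cons_append, List.cons.injEq, if_true]
    refine ⟨by simp, ?_⟩
    congr 1
    · apply List.map_congr_left; intro i _; simp [Function.comp]; ring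
    · congr 1; push_cast; ring

theorem goA_state_irrel (d : List Int) (hd : d = [] ∨ ∃ v r, d = v :: r ∧ v ≠ 1) (s : Int) :
    goA s d = goA 0 d := by
  rcases hd with h | ⟨v, r, rfl, hv⟩
  · subst h; rfl
  · simp [goA, hv]

theorem dropWhile_head_ne (l : List Int) :
    l.dropWhile (fun x => x = 1) = [] ∨
    ∃ v r, l.dropWhile (fun x => x = 1) = v :: r ∧ v ≠ 1 := by
  induction l with
  | nil => left; rfl
  | cons v r ih =>
    by_cases hv : v = 1
    · simpa [List.dropWhile, hv] using ih
    · right; exact ⟨v, r, by simp [List.dropWhile, hv], hv⟩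

theorem alt_go_cons_one (rest : List Int) :
    away_streak_py_alt_go (1 :: rest) =
      PySem.List.pyRange 1 ((((rest.takeWhile (fun x => x = 1)).length + 1 + 1 : ℕ) : ℤ)) 1 ++
        away_streak_py_alt_go (rest.dropWhile (fun x => x = 1)) := by
  rw [away_streak_py_alt_go.eq_def]
  push_cast
  simp

theorem alt_go_cons_ne (v : Int) (rest : List Int) (hv : v ≠ 1) :
    away_streak_py_alt_go (v :: rest) = 0 :: away_streak_py_alt_go rest := by
  rw [away_streak_py_alt_go.eq_def]
  simp [hv]

theorem goA_eq_alt : ∀ (n : ℕ) (xs : List Int), xs.length ≤ n → goA 0 xs = away_streak_py_alt_go xs := by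
  intro n
  induction n with
  | zero => intro xs h; simp at h; simp [h, goA, away_streak_py_alt_go]
  | succ n ih =>
    intro xs h
    match xs with
    | [] => simp [goA, away_streak_py_alt_go]
    | v :: rest =>
      by_cases hv : v = 1
      · subst hv
        set t := rest.takeWhile (fun x => x = 1) with hteq
        set d := rest.dropWhile (fun x => x = 1) with hdeq
        have hsplit : rest = t ++ d := (List.takeWhile_append_dropWhile).symm
        have ht1 : ∀ x ∈ t, x = 1 := by
          intro x hx
          have := List.mem_takeWhile_imp hx
          simpa using this
        have hdlen : d.length ≤ rest.length := List.length_dropWhile_le _ _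
        have hrec : goA 0 d = away_streak_py_alt_go d := by
          apply ih; simp at h; omega
        have hones : ∀ x ∈ (1 : Int) :: t, x = 1 := by
          intro x hx
          simp only [List.mem_cons] at hx
          rcases hx with rfl | hx
          · rfl
          · exact ht1 x hx
        have hlhs : goA 0 (1 :: rest) = goA 0 ((1 :: t) ++ d) := by
          conv_lhs => rw [hsplit]
          rfl
        rw [hlhs, goA_ones (1 :: t) hones, goA_state_irrel d (dropWhile_head_ne rest), hrec,
          alt_go_cons_one, ← hteq, ← hdeq]
        congr 1
        rw [PySem.List.pyRange_one]
        have hl : ((((1 :: t).length : ℕ) : ℤ) - 1).toNat = t.length := by simp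
        have hl2 : (((t.length + 1 + 1 : ℕ) : ℤ) - 1).toNat = t.length + 1 := by omega
        rw [hl2, List.length_cons]
        apply List.map_congr_left
        intro i _
        omega
      · rw [alt_go_cons_ne v rest hv, goA]
        have : goA 0 rest = away_streak_py_alt_go rest := by
          apply ih; simp at h; omega
        simp [hv, this]

-- ===== VERDICT (by name: the statement is the Claim_ definition above) =====
theorem away_streak_py_spec : Claim_equal_away_streak_py := by
  intro xs _
  show away_streak_py xs = away_streak_py_alt xs
  rw [away_streak_py, foldl_goA, List.nil_append, away_streak_py_alt]
  exact goA_eq_alt xs.length xs le_rfl
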